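-- pv_equiv track=rewrite | github.com/rk-mlu/advent-of-code | 2023/day07/camelcards.py | hand2value
-- ===== SOURCE A (Python) =====
-- def hand2value(hand):
--     value = 0
--
--     cards = []
--     for j in range(2,10):
--         cards.append(str(j))
--     cards = cards + ['T', 'J', 'Q', 'K', 'A']
--
--     b = len(cards)
--     p = len(hand)
--
--     for e, c in enumerate(hand):
--         m = cards.index(c)
--         value += m*b**(p-e-1)
--
--     return value
-- ===== SOURCE B (Python) =====
-- def hand2value(hand):
--     order = "23456789TJQKA"
--     value = 0
--     for c in hand:
--         value = value * 13 + order.index(c)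
--     return value
-- ===== Notes on version B (the rewrite author's own statement) =====
-- stated objective: simpler
-- what changed: Replaces the dynamically built card list and per-position power sum m*b**(p-e-1) with Horner's rule over a fixed alphabet string: one rolling accumulator value = value*13 + order.index(c), no exponentiation and no enumerate.
import Mathlib
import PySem

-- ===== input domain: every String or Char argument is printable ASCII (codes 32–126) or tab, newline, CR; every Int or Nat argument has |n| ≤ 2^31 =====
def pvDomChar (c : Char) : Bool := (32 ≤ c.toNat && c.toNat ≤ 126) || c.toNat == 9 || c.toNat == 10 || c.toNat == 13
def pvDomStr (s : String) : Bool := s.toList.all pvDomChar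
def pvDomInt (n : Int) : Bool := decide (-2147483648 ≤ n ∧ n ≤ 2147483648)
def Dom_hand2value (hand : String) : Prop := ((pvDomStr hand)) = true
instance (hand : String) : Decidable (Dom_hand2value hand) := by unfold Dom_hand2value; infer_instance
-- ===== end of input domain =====

-- B changes the decomposition: Horner's rule with one rolling accumulator over a fixed
-- alphabet string, instead of A's dynamically built card list and per-position power sum.

-- ===== PORT A =====
-- literal transliteration of A: build cards via range(2,10), then sum m*b**(p-e-1) over enumerate(hand)
def hand2value (hand : String) : Int :=
  let cards : List String :=
    ((PySem.List.pyRange 2 10 1).foldl (fun acc j => acc ++ [PySem.Int.toStr j]) [])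
      ++ ["T", "J", "Q", "K", "A"]
  let b : Int := cards.length
  let p : Int := hand.toList.length
  (PySem.List.enumerate hand.toList 0).foldl
    (fun value ec =>
      -- cards.index(c): raises ValueError when c ∉ cards; excluded by Pre_hand2value
      let m : Int := ((PySem.List.index? cards (String.singleton ec.2)).getD 0 : Nat)
      value + m * b ^ (p - ec.1 - 1).toNat)
    0

-- ===== PORT B =====
-- literal transliteration of B: value = value*13 + order.index(c), left to right
def hand2value_alt (hand : String) : Int :=
  hand.toList.foldl
    (fun value c =>
      -- order.index(c): raises ValueError when c ∉ order; excluded by Pre_hand2value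
      value * 13 + ((PySem.List.index? "23456789TJQKA".toList c).getD 0 : Nat))
    0

-- ===== PRECONDITION & SPEC =====
-- Pre_ excludes exactly the hands containing a card outside "23456789TJQKA",
-- on which A's list.index (and B's str.index) raises ValueError.
def Pre_hand2value (hand : String) : Prop :=
  (hand.toList.all (fun c => ['2','3','4','5','6','7','8','9','T','J','Q','K','A'].contains c)) = true
instance (hand : String) : Decidable (Pre_hand2value hand) := by unfold Pre_hand2value; infer_instance

def pvWitness_hand2value : String := "T55J5"

def Spec_hand2value (hand : String) (out : Int) : Prop := out = hand2value_alt hand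
instance (hand : String) (out : Int) : Decidable (Spec_hand2value hand out) := by unfold Spec_hand2value; infer_instance

-- ===== CLAIM (what is proved, stated in full; the proofs are below) =====
def Claim_equal_hand2value : Prop :=
  ∀ (hand : String), Dom_hand2value hand → Pre_hand2value hand → Spec_hand2value hand (hand2value hand)

-- ===== LEMMAS AND PROOFS =====

-- the common card value, used by the reference function below
def pvIdx (c : Char) : Int :=
  ((PySem.List.index? "23456789TJQKA".toList c).getD 0 : Nat)

-- reference value: positional base-13 sum, defined structurally
def pvVal : List Char → Int
  | [] => 0
  | c :: cs => pvIdx c * 13 ^ cs.length + pvVal cs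

-- A's cards list evaluates to the literal alphabet (as one-char strings)
theorem pvCardsA_eq :
    ((PySem.List.pyRange 2 10 1).foldl (fun acc j => acc ++ [PySem.Int.toStr j]) [])
      ++ ["T", "J", "Q", "K", "A"]
    = ["2","3","4","5","6","7","8","9","T","J","Q","K","A"] := by decide

-- A's string-list lookup agrees with the char-list lookup on in-alphabet cards
theorem pvIdx_bridge (c : Char) (hc : c ∈ ['2','3','4','5','6','7','8','9','T','J','Q','K','A']) :
    ((PySem.List.index? ["2","3","4","5","6","7","8","9","T","J","Q","K","A"]
        (String.singleton c)).getD 0 : Nat) = pvIdx c := by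
  have : c = '2' ∨ c = '3' ∨ c = '4' ∨ c = '5' ∨ c = '6' ∨ c = '7' ∨ c = '8' ∨ c = '9' ∨
      c = 'T' ∨ c = 'J' ∨ c = 'Q' ∨ c = 'K' ∨ c = 'A' := by
    simpa using hc
  rcases this with h|h|h|h|h|h|h|h|h|h|h|h|h <;> subst h <;> decide

-- B's Horner fold in terms of the reference value
theorem pvHorner (l : List Char) (v : Int) :
    l.foldl (fun value c => value * 13 + pvIdx c) v = v * 13 ^ l.length + pvVal l := by
  induction l generalizing v with
  | nil => simp [pvVal]
  | cons c cs ih =>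
    simp only [List.foldl_cons, List.length_cons, pvVal, ih]
    ring

-- A's enumerate fold in terms of the reference value
theorem pvSum (p : Int) (l : List Char) (s v : Int) (h : s + l.length = p) :
    (PySem.List.enumerate l s).foldl
      (fun value ec => value + pvIdx ec.2 * 13 ^ (p - ec.1 - 1).toNat) v
    = v + pvVal l := by
  induction l generalizing s v with
  | nil => simp [PySem.List.enumerate_nil, pvVal]
  | cons c cs ih =>
    rw [PySem.List.enumerate_cons, List.foldl_cons]
    have hexp : (p - s - 1).toNat = cs.length := by
      simp [List.length_cons] at h; omega
    rw [hexp, ih (s + 1) _ (by simp at h ⊢; omega)]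
    simp [pvVal]; ring

-- ===== VERDICT (by name: the statement is the Claim_ definition above) =====
theorem hand2value_spec : Claim_equal_hand2value := by
  intro hand _ hpre
  unfold Pre_hand2value at hpre
  unfold Spec_hand2value hand2value hand2value_alt
  rw [pvCardsA_eq]
  have hstep :
      (PySem.List.enumerate hand.toList 0).foldl
        (fun value ec =>
          value + (((PySem.List.index? ["2","3","4","5","6","7","8","9","T","J","Q","K","A"]
            (String.singleton ec.2)).getD 0 : Nat) : Int)
            * ((["2","3","4","5","6","7","8","9","T","J","Q","K","A"].length : Int))
              ^ ((hand.toList.length : Int) - ec.1 - 1).toNat) 0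
      = (PySem.List.enumerate hand.toList 0).foldl
        (fun value ec => value + pvIdx ec.2 * 13 ^ (((hand.toList.length : Int)) - ec.1 - 1).toNat) 0 := by
    apply PySem.List.foldl_congr_mem
    intro acc ec hmem
    have hc : ec.2 ∈ hand.toList := by
      rw [PySem.List.mem_enumerate_iff] at hmem
      rcases hmem with ⟨k, hk, rfl⟩
      exact List.getElem_mem hk
    have hm : ec.2 ∈ ['2','3','4','5','6','7','8','9','T','J','Q','K','A'] := by
      have := List.all_eq_true.mp hpre _ hc
      simpa using this
    rw [pvIdx_bridge ec.2 hm]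
    norm_num
  rw [hstep, pvSum (hand.toList.length : Int) hand.toList 0 0 (by simp)]
  have hB : List.foldl
      (fun value c => value * 13 + (((PySem.List.index? "23456789TJQKA".toList c).getD 0 : Nat) : Int))
      0 hand.toList
      = List.foldl (fun value c => value * 13 + pvIdx c) 0 hand.toList := rfl
  rw [hB, pvHorner hand.toList 0]
  simp
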